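-- pv_equiv track=rewrite | github.com/jaivrat/python_codes | learn/python_algo/test_pascals_triangle_ncr.py | solve
-- ===== SOURCE A (Python) =====
-- def solve(n):
--     # Write your code here
--     if n == 0:
--         return [1]
--
--     prev_row = [1]
--     curr_row = None
--     # start from second row (n =1 or power 1 ie (x+a)^1)
--     for i in range(1, n+1, 1):
--         # prepend and append 0 to first row
--         prev_row.insert(0, 0)
--         prev_row.insert(len(prev_row), 0)
--         curr_row = [0]*(i+1)
--         for j in range(0,len(curr_row)):
--             curr_row[j] = prev_row[j] + prev_row[j+1]
--         prev_row = curr_row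
--     # need to return as per question
--     res = [x%(int(1e9)) for x in curr_row]
--     return res
-- ===== SOURCE B (Python) =====
-- def solve(n):
--     row = [1]
--     c = 1
--     for k in range(1, n + 1):
--         c = c * (n - k + 1) // k
--         row.append(c)
--     return [x % 10**9 for x in row]
-- ===== Notes on version B (the rewrite author's own statement) =====
-- stated objective: faster
-- what changed: Replaces the row-by-row Pascal-triangle rebuild (n rows, each summing adjacent pairs) by a single pass computing each entry from the previous one via the multiplicative recurrence C(n,k)=C(n,k-1)*(n-k+1)//k.
import Mathlib
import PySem

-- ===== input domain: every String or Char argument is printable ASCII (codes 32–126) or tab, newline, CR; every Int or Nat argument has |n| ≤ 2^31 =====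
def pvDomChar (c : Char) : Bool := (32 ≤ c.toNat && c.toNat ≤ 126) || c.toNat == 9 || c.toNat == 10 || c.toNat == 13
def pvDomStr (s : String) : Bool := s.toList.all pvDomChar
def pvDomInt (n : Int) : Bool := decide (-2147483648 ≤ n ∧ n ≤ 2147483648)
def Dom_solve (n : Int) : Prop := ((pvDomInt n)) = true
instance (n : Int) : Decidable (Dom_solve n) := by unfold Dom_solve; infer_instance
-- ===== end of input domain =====

-- B replaces A's O(n^2) row-by-row Pascal rebuild by the O(n) multiplicative
-- recurrence C(n,k) = C(n,k-1)*(n-k+1)//k; return values agree for all n ≥ 0.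

-- ===== PORT A =====
-- one iteration of A's outer loop: prev_row gets 0 prepended and appended,
-- then curr_row[j] = prev_row[j] + prev_row[j+1] for j in range(i+1)
def solveStep (prev : List Int) (i : Nat) : List Int :=
  let p := 0 :: (prev ++ [0])
  (List.range (i + 1)).map (fun j => p.getD j 0 + p.getD (j + 1) 0)

def solve (n : Int) : List Int :=
  if n = 0 then [1]
  else
    -- for i in range(1, n+1): prev_row = curr_row  (i = k+1 for k in range(n.toNat))
    let curr := (List.range n.toNat).foldl (fun prev k => solveStep prev (k + 1)) [1]
    curr.map (fun x => PySem.Int.mod x 1000000000)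

-- ===== PORT B =====
def solve_alt (n : Int) : List Int :=
  -- row = [1]; c = 1; for k in range(1, n+1): c = c*(n-k+1)//k; row.append(c)
  let s := (List.range n.toNat).foldl
    (fun (s : List Int × Int) (k : Nat) =>
      let c := PySem.Int.floordiv (s.2 * (n - ((k : Int) + 1) + 1)) ((k : Int) + 1)
      (s.1 ++ [c], c)) ([1], 1)
  s.1.map (fun x => PySem.Int.mod x 1000000000)

-- ===== PRECONDITION & SPEC =====
-- For n < 0 the Python A raises TypeError (its loop never runs and curr_row stays None).
def Pre_solve (n : Int) : Prop := 0 ≤ n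
instance (n : Int) : Decidable (Pre_solve n) := by unfold Pre_solve; infer_instance
def pvWitness_solve : Int := (5)

def Spec_solve (n : Int) (out : List Int) : Prop := out = solve_alt n
instance (n : Int) (out : List Int) : Decidable (Spec_solve n out) := by unfold Spec_solve; infer_instance

-- ===== CLAIM (what is proved, stated in full; the proofs are below) =====
def Claim_equal_solve : Prop := ∀ (n : Int), Dom_solve n → Pre_solve n → Spec_solve n (solve n)

-- ===== LEMMAS AND PROOFS =====

-- the exact Pascal row of order m, as integers
def rowC (m : Nat) : List Int := (List.range (m + 1)).map (fun j => ((m.choose j : Nat) : Int))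

theorem getD_rowC_app (m i : Nat) :
    (rowC m ++ [0]).getD i 0 = ((m.choose i : Nat) : Int) := by
  rcases lt_trichotomy i (m + 1) with h | h | h
  · rw [List.getD_append _ _ _ _ (by simpa [rowC] using h)]
    simp [rowC, List.getD, h]
  · rw [List.getD_append_right _ _ _ _ (by simp [rowC]; omega)]
    simp [rowC, h]
  · have hlen : (rowC m ++ [0]).length ≤ i := by simp [rowC]; omega
    simp [List.getD_eq_getElem?_getD, List.getElem?_eq_none hlen,
      Nat.choose_eq_zero_of_lt (by omega : m < i)]

theorem getD_p (m j : Nat) :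
    (0 :: (rowC m ++ [0])).getD j 0 =
      (if j = 0 then 0 else ((m.choose (j - 1) : Nat) : Int)) := by
  cases j with
  | zero => simp
  | succ i => simpa using getD_rowC_app m i

theorem solveStep_rowC (m : Nat) : solveStep (rowC m) (m + 1) = rowC (m + 1) := by
  simp only [solveStep]
  conv_rhs => rw [rowC]
  refine List.map_congr_left (fun j _ => ?_)
  rw [getD_p, getD_p]
  cases j with
  | zero => simp
  | succ i =>
    simp only [if_neg (Nat.succ_ne_zero i), if_neg (Nat.succ_ne_zero (i + 1)),
      Nat.succ_sub_one]
    rw [Nat.choose_succ_succ' m i]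
    push_cast; ring

theorem A_loop (m : Nat) :
    (List.range m).foldl (fun prev k => solveStep prev (k + 1)) [1] = rowC m := by
  induction m with
  | zero => simp [rowC]
  | succ m ih =>
    rw [List.range_succ, List.foldl_append, ih]
    simpa using solveStep_rowC m

theorem B_loop (n : Nat) (m : Nat) (hm : m ≤ n) :
    (List.range m).foldl
      (fun (s : List Int × Int) (k : Nat) =>
        let c := PySem.Int.floordiv (s.2 * ((n : Int) - ((k : Int) + 1) + 1)) ((k : Int) + 1)
        (s.1 ++ [c], c)) ([1], 1)
    = ((List.range (m + 1)).map (fun j => ((n.choose j : Nat) : Int)), ((n.choose m : Nat) : Int)) := by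
  induction m with
  | zero => simp
  | succ m ih =>
    rw [List.range_succ, List.foldl_append, ih (by omega)]
    have hsub : (n : Int) - ((m : Int) + 1) + 1 = ((n - m : Nat) : Int) := by
      have h : m < n := by omega
      push_cast [Nat.cast_sub (le_of_lt h)]; ring
    have hmul : ((n.choose m : Nat) : Int) * ((n - m : Nat) : Int)
        = ((n.choose (m + 1) * (m + 1) : Nat) : Int) := by
      rw [Nat.choose_succ_right_eq n m]; push_cast; ring
    have hdiv : PySem.Int.floordiv ((n.choose (m + 1) * (m + 1) : Nat) : Int) ((m : Int) + 1)
        = ((n.choose (m + 1) : Nat) : Int) := by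
      have h1 : ((m : Int) + 1) = (((m + 1 : Nat) : Nat) : Int) := by push_cast; ring
      rw [h1, PySem.Int.floordiv_natCast]
      norm_num [Nat.mul_div_cancel]
    simp only [List.foldl_cons, List.foldl_nil, hsub, hmul, hdiv]
    rw [List.range_succ (n := m + 1), List.map_append]
    simp

-- ===== VERDICT (by name: the statement is the Claim_ definition above) =====
theorem solve_spec : Claim_equal_solve := by
  intro n _ hpre
  unfold Spec_solve
  obtain ⟨m, rfl⟩ : ∃ m : Nat, n = (m : Int) := ⟨n.toNat, (Int.toNat_of_nonneg hpre).symm⟩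
  have hB : solve_alt (m : Int) = (rowC m).map (fun x => PySem.Int.mod x 1000000000) := by
    simp only [solve_alt, Int.toNat_natCast, B_loop m m le_rfl, rowC]
  cases m with
  | zero =>
    rw [hB]
    simp [solve, rowC, PySem.Int.mod]
  | succ m =>
    rw [hB]
    have h0 : ((m + 1 : Nat) : Int) ≠ 0 := by omega
    simp only [solve, if_neg h0, Int.toNat_natCast, A_loop]
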